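-- pv_equiv track=rewrite | github.com/MaximRas/samples | tools/__init__.py | sort_list_by_dict_key
-- ===== SOURCE A (Python) =====
-- from typing import Any
-- from typing import Iterable
-- from typing import Mapping
--
-- def sort_list_by_dict_key(schema: Iterable[Mapping[str, Any]], key_to_sort: str) -> Iterable[Mapping[str, Any]]:
--     key_to_dict = {}
--     for item in schema:
--         key_to_dict[item[key_to_sort].lower()] = item
--     result = []
--     for key in sorted(key_to_dict.keys()):
--         result.append(key_to_dict[key])
--     return result
-- ===== SOURCE B (Python) =====
-- def sort_list_by_dict_key(schema, key_to_sort):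
--     items = sorted(schema, key=lambda item: item[key_to_sort].lower())
--     result = []
--     for item in items:
--         if result and result[-1][key_to_sort].lower() == item[key_to_sort].lower():
--             result[-1] = item
--         else:
--             result.append(item)
--     return result
-- ===== Notes on version B (the rewrite author's own statement) =====
-- stated objective: alternative
-- what changed: A indexes the items into a dict keyed by the lowercased key value (last wins), then sorts the keys and looks each one up; B stably sorts the items by the lowercased key and makes one linear pass over the sorted list, replacing the previous result entry within a run of equal keys so the last item of each run survives.
import Mathlib
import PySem

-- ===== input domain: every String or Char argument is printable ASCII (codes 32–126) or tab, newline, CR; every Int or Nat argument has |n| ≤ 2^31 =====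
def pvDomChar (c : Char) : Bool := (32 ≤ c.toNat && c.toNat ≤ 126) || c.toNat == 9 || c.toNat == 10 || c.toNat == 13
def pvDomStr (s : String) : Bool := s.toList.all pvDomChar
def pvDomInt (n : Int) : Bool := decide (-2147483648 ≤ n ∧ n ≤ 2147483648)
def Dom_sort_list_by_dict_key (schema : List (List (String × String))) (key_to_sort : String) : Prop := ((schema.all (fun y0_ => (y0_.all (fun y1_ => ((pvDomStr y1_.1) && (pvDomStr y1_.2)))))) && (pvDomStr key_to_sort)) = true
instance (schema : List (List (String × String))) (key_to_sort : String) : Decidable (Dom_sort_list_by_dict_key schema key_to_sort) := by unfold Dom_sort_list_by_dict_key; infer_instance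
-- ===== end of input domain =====

-- B replaces A's dict-as-index-then-sorted-keys with a stable sort of the items followed by one
-- adjacent-run dedup pass (last of each run wins); same return value (alternative decomposition).

-- item[key_to_sort].lower() — appears in both Python versions (KeyError = none, excluded by Pre_;
-- the .getD "" default is unreachable inside Pre_)
def pvLowKey (key_to_sort : String) (item : List (String × String)) : String :=
  PySem.Str.lower (((PySem.Dict.mk item).get? key_to_sort).getD "")

-- ===== PORT A =====
def sort_list_by_dict_key (schema : List (List (String × String))) (key_to_sort : String) : List (List (String × String)) :=
  let key_to_dict : PySem.Dict String (List (String × String)) :=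
    schema.foldl (fun d item => d.insert (pvLowKey key_to_sort item) item) PySem.Dict.empty
  -- key_to_dict[key] never misses: the keys come from the dict itself (the [] default is unreachable)
  (PySem.List.sorted key_to_dict.keys (fun k => k)).foldl
    (fun result k => result ++ [key_to_dict.getD k []]) []

-- ===== PORT B =====
-- 'if result and result[-1][key_to_sort].lower() == item[key_to_sort].lower()' is the Bool
-- condition '!result.isEmpty && …' (result.getLastD [] is result[-1], guarded by the isEmpty test)
def sort_list_by_dict_key_alt (schema : List (List (String × String))) (key_to_sort : String) : List (List (String × String)) :=
  let items := PySem.List.sorted schema (pvLowKey key_to_sort)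
  items.foldl (fun result item =>
    if !result.isEmpty && (pvLowKey key_to_sort (result.getLastD []) == pvLowKey key_to_sort item)
    then result.dropLast ++ [item]
    else result ++ [item]) []

-- ===== PRECONDITION & SPEC =====
-- Pre_: every dict of schema contains key_to_sort (otherwise Python A raises KeyError)
def Pre_sort_list_by_dict_key (schema : List (List (String × String))) (key_to_sort : String) : Prop :=
  (schema.all (fun item => item.any (fun p => p.1 == key_to_sort))) = true
instance (schema : List (List (String × String))) (key_to_sort : String) : Decidable (Pre_sort_list_by_dict_key schema key_to_sort) := by unfold Pre_sort_list_by_dict_key; infer_instance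

def pvWitness_sort_list_by_dict_key : (List (List (String × String))) × String :=
  ([[("k", "B")], [("k", "a")], [("k", "A")]], "k")

def Spec_sort_list_by_dict_key (schema : List (List (String × String))) (key_to_sort : String) (out : List (List (String × String))) : Prop := out = sort_list_by_dict_key_alt schema key_to_sort
instance (schema : List (List (String × String))) (key_to_sort : String) (out : List (List (String × String))) : Decidable (Spec_sort_list_by_dict_key schema key_to_sort out) := by unfold Spec_sort_list_by_dict_key; infer_instance

-- ===== CLAIM (what is proved, stated in full; the proofs are below) =====
def Claim_equal_sort_list_by_dict_key : Prop := ∀ (schema : List (List (String × String))) (key_to_sort : String), Dom_sort_list_by_dict_key schema key_to_sort → Pre_sort_list_by_dict_key schema key_to_sort → Spec_sort_list_by_dict_key schema key_to_sort (sort_list_by_dict_key schema key_to_sort)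

-- ===== LEMMAS AND PROOFS =====

-- ---- B's fold = adjacent-run dedup (keep the last of each run of equal keys) ----
def dedupLastRun {α : Type} (kf : α → String) : List α → List α
  | [] => []
  | [x] => [x]
  | x :: y :: t =>
      if kf x == kf y then dedupLastRun kf (y :: t) else x :: dedupLastRun kf (y :: t)

-- the replace-last fold ignores everything strictly before the last element of its accumulator
theorem foldl_replaceLast_append {α : Type} (kf : α → String) (dflt : α) (t : List α) :
    ∀ (res0 : List α) (a : α),
    List.foldl (fun result item =>
      if !result.isEmpty && (kf (result.getLastD dflt) == kf item)
      then result.dropLast ++ [item]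
      else result ++ [item]) (res0 ++ [a]) t
    = res0 ++ List.foldl (fun result item =>
      if !result.isEmpty && (kf (result.getLastD dflt) == kf item)
      then result.dropLast ++ [item]
      else result ++ [item]) [a] t := by
  induction t with
  | nil => intro res0 a; simp
  | cons x t' ih =>
    intro res0 a
    have e1 : (res0 ++ [a]).isEmpty = false := by simp
    have e2 : (res0 ++ [a]).getLastD dflt = a := by
      simp [List.getLastD_eq_getLast?]
    simp only [List.foldl_cons, e1, e2, List.isEmpty_cons, Bool.not_false, Bool.true_and,
      (show [a].getLastD dflt = a from rfl), List.dropLast_concat, List.dropLast_singleton,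
      List.nil_append]
    by_cases hk : (kf a == kf x) = true
    · rw [if_pos hk, if_pos hk]
      exact ih res0 x
    · rw [if_neg hk, if_neg hk]
      rw [ih (res0 ++ [a]) x, ih [a] x, List.append_assoc]

theorem foldl_replaceLast_single {α : Type} (kf : α → String) (dflt : α) (t : List α) :
    ∀ (a : α),
    List.foldl (fun result item =>
      if !result.isEmpty && (kf (result.getLastD dflt) == kf item)
      then result.dropLast ++ [item]
      else result ++ [item]) [a] t
    = dedupLastRun kf (a :: t) := by
  induction t with
  | nil => intro a; simp [dedupLastRun]
  | cons x t' ih =>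
    intro a
    simp only [List.foldl_cons, List.isEmpty_cons, Bool.not_false, Bool.true_and,
      (show [a].getLastD dflt = a from rfl), List.dropLast_singleton, List.nil_append]
    by_cases hk : (kf a == kf x) = true
    · rw [if_pos hk, ih x]
      simp [dedupLastRun, hk]
    · rw [if_neg hk, foldl_replaceLast_append kf dflt t' [a] x, ih x]
      simp [dedupLastRun, hk]

theorem foldl_replaceLast_eq_dedupLastRun {α : Type} (kf : α → String) (dflt : α) (s : List α) :
    List.foldl (fun result item =>
      if !result.isEmpty && (kf (result.getLastD dflt) == kf item)
      then result.dropLast ++ [item]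
      else result ++ [item]) [] s
    = dedupLastRun kf s := by
  cases s with
  | nil => rfl
  | cons a t =>
    have e0 : List.foldl (fun result item =>
        if !result.isEmpty && (kf (result.getLastD dflt) == kf item)
        then result.dropLast ++ [item]
        else result ++ [item]) [] (a :: t)
      = List.foldl (fun result item =>
        if !result.isEmpty && (kf (result.getLastD dflt) == kf item)
        then result.dropLast ++ [item]
        else result ++ [item]) [a] t := by
      simp
    rw [e0]
    exact foldl_replaceLast_single kf dflt t a

-- ---- stability of the insertion sort w.r.t. a fixed key value ----
theorem pairwise_insertBy {α : Type} (kf : α → String) (x : α) (acc : List α)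
    (h : acc.Pairwise (fun a b => kf a ≤ kf b)) :
    (PySem.List.insertBy (fun a b => decide (kf a < kf b)) x acc).Pairwise (fun a b => kf a ≤ kf b) := by
  induction acc with
  | nil => simp [PySem.List.insertBy]
  | cons y ys ih =>
    rcases List.pairwise_cons.mp h with ⟨hy, hys⟩
    have hunf : PySem.List.insertBy (fun a b => decide (kf a < kf b)) x (y :: ys)
        = if kf x < kf y then x :: y :: ys
          else y :: PySem.List.insertBy (fun a b => decide (kf a < kf b)) x ys := by
      simp [PySem.List.insertBy]
    rw [hunf]
    by_cases hlt : kf x < kf y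
    · rw [if_pos hlt]
      refine List.pairwise_cons.mpr ⟨?_, h⟩
      intro b hb
      rcases List.mem_cons.mp hb with rfl | hb
      · exact le_of_lt hlt
      · exact le_of_lt (lt_of_lt_of_le hlt (hy b hb))
    · rw [if_neg hlt]
      refine List.pairwise_cons.mpr ⟨?_, ih hys⟩
      intro b hb
      rcases (PySem.List.mem_insertBy _ x b ys).mp hb with rfl | hb
      · exact not_lt.mp hlt
      · exact hy b hb

theorem filter_insertBy {α : Type} (kf : α → String) (k : String) (x : α) (acc : List α)
    (h : acc.Pairwise (fun a b => kf a ≤ kf b)) :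
    (PySem.List.insertBy (fun a b => decide (kf a < kf b)) x acc).filter (fun a => kf a == k)
    = acc.filter (fun a => kf a == k) ++ (if kf x == k then [x] else []) := by
  induction acc with
  | nil =>
    by_cases hk : (kf x == k) = true <;>
      simp [PySem.List.insertBy, hk]
  | cons y ys ih =>
    rcases List.pairwise_cons.mp h with ⟨hy, hys⟩
    have hunf : PySem.List.insertBy (fun a b => decide (kf a < kf b)) x (y :: ys)
        = if kf x < kf y then x :: y :: ys
          else y :: PySem.List.insertBy (fun a b => decide (kf a < kf b)) x ys := by
      simp [PySem.List.insertBy]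
    rw [hunf]
    by_cases hlt : kf x < kf y
    · rw [if_pos hlt]
      by_cases hk : (kf x == k) = true
      · have hkx : kf x = k := by simpa using hk
        have hbig : ∀ b ∈ y :: ys, (kf b == k) = false := by
          intro b hb
          have hbk : k < kf b := by
            rcases List.mem_cons.mp hb with rfl | hb
            · exact hkx ▸ hlt
            · exact lt_of_lt_of_le (hkx ▸ hlt) (hy b hb)
          simp only [beq_eq_false_iff_ne, ne_eq]
          exact fun e => lt_irrefl k (e ▸ hbk)
        have hky := hbig y (List.mem_cons_self)
        have hfys : List.filter (fun a => kf a == k) ys = [] := by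
          rw [List.filter_eq_nil_iff]
          intro a ha
          simp [hbig a (List.mem_cons_of_mem y ha)]
        simp [hk, hky, hfys]
      · simp [List.filter_cons, hk]
    · rw [if_neg hlt, List.filter_cons, List.filter_cons, ih hys]
      by_cases hky : (kf y == k) = true <;> simp [hky]

theorem filter_foldl_insertBy {α : Type} (kf : α → String) (k : String) (l : List α) :
    ∀ (acc : List α), acc.Pairwise (fun a b => kf a ≤ kf b) →
    (l.foldl (fun acc x => PySem.List.insertBy (fun a b => decide (kf a < kf b)) x acc) acc).filter
        (fun a => kf a == k)
    = acc.filter (fun a => kf a == k) ++ l.filter (fun a => kf a == k) := by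
  induction l with
  | nil => intro acc _; simp
  | cons x l' ih =>
    intro acc h
    rw [List.foldl_cons, ih _ (pairwise_insertBy kf x acc h), filter_insertBy kf k x acc h,
      List.filter_cons]
    by_cases hk : (kf x == k) = true <;> simp [hk]

theorem sorted_filter_stable {α : Type} (kf : α → String) (k : String) (xs : List α) :
    (PySem.List.sorted xs kf).filter (fun a => kf a == k) = xs.filter (fun a => kf a == k) := by
  rw [PySem.List.sorted_eq_foldl_insertBy]
  simpa using filter_foldl_insertBy kf k xs [] List.Pairwise.nil

-- ---- A's dict fold: lookup = last matching element ----
theorem get?_foldl_insert_key {α : Type} (kf : α → String) (k : String) (l : List α) :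
    ∀ (d : PySem.Dict String α),
    (l.foldl (fun d a => d.insert (kf a) a) d).get? k
    = ((l.filter (fun a => kf a == k)).getLast?).or (d.get? k) := by
  induction l with
  | nil => intro d; simp
  | cons a l' ih =>
    intro d
    rw [List.foldl_cons, ih, List.filter_cons]
    by_cases hk : (kf a == k) = true
    · have hka : kf a = k := by simpa using hk
      rw [if_pos hk, PySem.Dict.get?_insert, if_pos hka.symm]
      cases hfl : (l'.filter (fun a => kf a == k)).getLast? with
      | none =>
        have hnil : l'.filter (fun a => kf a == k) = [] := List.getLast?_eq_none_iff.mp hfl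
        simp [hnil]
      | some b =>
        have hcons : (a :: l'.filter (fun a => kf a == k)).getLast? = some b := by
          rw [List.getLast?_cons, hfl]
          rfl
        simp [hcons]
    · have hne : k ≠ kf a := fun e => by simp [e] at hk
      rw [if_neg (by simpa using hk), PySem.Dict.get?_insert, if_neg hne]

-- ---- dedup facts needed for the key lists ----
theorem discard_eq_filter {α : Type} [BEq α] (s : List α) (x : α) :
    PySem.Set.discard s x = s.filter (fun y => !(y == x)) := by
  simp [PySem.Set.discard]

theorem dedup_sublist {α : Type} [BEq α] [LawfulBEq α] (xs : List α) :
    (PySem.List.dedup xs).Sublist xs := by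
  induction xs with
  | nil => simp [PySem.List.dedup_eq_ofList, PySem.Set.ofList_nil]
  | cons x xs ih =>
    rw [PySem.List.dedup_eq_ofList, PySem.Set.ofList_cons, ← PySem.List.dedup_eq_ofList]
    refine List.Sublist.cons₂ x (List.Sublist.trans ?_ ih)
    rw [discard_eq_filter]
    exact List.filter_sublist

theorem dedup_cons_cons {α : Type} [BEq α] [LawfulBEq α] (a : α) (l : List α) :
    PySem.List.dedup (a :: a :: l) = PySem.List.dedup (a :: l) := by
  simp [PySem.List.dedup_eq_ofList, PySem.Set.ofList_cons, discard_eq_filter,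
    List.filter_filter]

-- ---- adjacent-run dedup of a key-sorted list, described by filters ----
theorem dedupLastRun_eq_map {α : Type} (kf : α → String) (dflt : α) :
    ∀ (s : List α), s.Pairwise (fun a b => kf a ≤ kf b) →
    dedupLastRun kf s
    = (PySem.List.dedup (s.map kf)).map
        (fun k => ((s.filter (fun a => kf a == k)).getLast?).getD dflt) := by
  intro s
  induction s with
  | nil => intro _; simp [dedupLastRun, PySem.List.dedup_eq_ofList, PySem.Set.ofList_nil]
  | cons x s' ih =>
    intro h
    rcases List.pairwise_cons.mp h with ⟨hx, h'⟩
    cases s' with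
    | nil =>
      simp [dedupLastRun, PySem.List.dedup_eq_ofList, PySem.Set.ofList_cons,
        PySem.Set.ofList_nil, discard_eq_filter, List.filter_cons]
    | cons y t =>
      by_cases hxy : (kf x == kf y) = true
      · have hxy' : kf x = kf y := by simpa using hxy
        have hL : dedupLastRun kf (x :: y :: t) = dedupLastRun kf (y :: t) := by
          simp [dedupLastRun, hxy]
        have hK : PySem.List.dedup (List.map kf (x :: y :: t))
            = PySem.List.dedup (List.map kf (y :: t)) := by
          simp only [List.map_cons]
          rw [hxy']
          exact dedup_cons_cons (kf y) (List.map kf t)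
        rw [hL, ih h', hK]
        apply List.map_congr_left
        intro k _
        by_cases hxk : (kf x == k) = true
        · have hyk : (kf y == k) = true := by rw [← hxy']; exact hxk
          simp [hxk, hyk]
        · simp [List.filter_cons, hxk]
      · have hxy' : kf x ≠ kf y := by simpa using hxy
        have hlt : ∀ b ∈ y :: t, kf x < kf b := by
          intro b hb
          have hxley : kf x ≤ kf y := hx y (List.mem_cons_self)
          rcases List.mem_cons.mp hb with rfl | hb
          · exact lt_of_le_of_ne hxley hxy'
          · exact lt_of_lt_of_le (lt_of_le_of_ne hxley hxy')
              ((List.pairwise_cons.mp h').1 b hb)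
        have hnotmem : kf x ∉ List.map kf (y :: t) := by
          intro hmem
          rcases List.mem_map.mp hmem with ⟨b, hb, hbe⟩
          exact absurd hbe (ne_of_lt (hlt b hb)).symm
        have hL : dedupLastRun kf (x :: y :: t) = x :: dedupLastRun kf (y :: t) := by
          simp [dedupLastRun, hxy]
        have hK : PySem.List.dedup (List.map kf (x :: y :: t))
            = kf x :: PySem.List.dedup (List.map kf (y :: t)) := by
          rw [List.map_cons, PySem.List.dedup_eq_ofList, PySem.Set.ofList_cons,
            ← PySem.List.dedup_eq_ofList]
          have hnm : kf x ∉ PySem.List.dedup (List.map kf (y :: t)) := by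
            intro hmem
            exact hnotmem ((PySem.List.mem_dedup _ _).mp hmem)
          congr 1
          rw [discard_eq_filter]
          apply List.filter_eq_self.mpr
          intro b hb
          simp only [Bool.not_eq_true', beq_eq_false_iff_ne, ne_eq]
          exact fun e => hnm (e ▸ hb)
        rw [hL, hK, List.map_cons]
        congr 1
        · have hfil : (y :: t).filter (fun a => kf a == kf x) = [] := by
            rw [List.filter_eq_nil_iff]
            intro b hb
            simp only [beq_iff_eq]
            exact fun e => absurd e (ne_of_gt (hlt b hb))
          simp [hfil]
        · rw [ih h']
          apply List.map_congr_left
          intro k hk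
          have hkne : (kf x == k) = false := by
            simp only [beq_eq_false_iff_ne, ne_eq]
            intro e
            exact hnotmem (e ▸ (PySem.List.mem_dedup _ _).mp hk)
          simp [List.filter_cons, hkne]

theorem main_equiv (schema : List (List (String × String))) (key_to_sort : String) :
    sort_list_by_dict_key schema key_to_sort = sort_list_by_dict_key_alt schema key_to_sort := by
  simp only [sort_list_by_dict_key, sort_list_by_dict_key_alt]
  rw [PySem.List.foldl_append_singleton_eq_map, List.nil_append,
    foldl_replaceLast_eq_dedupLastRun (pvLowKey key_to_sort) ([] : List (String × String)),
    dedupLastRun_eq_map (pvLowKey key_to_sort) []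
      (PySem.List.sorted schema (pvLowKey key_to_sort))
      (PySem.List.sorted_pairwise schema (pvLowKey key_to_sort))]
  have hkeys : (schema.foldl (fun d item => d.insert (pvLowKey key_to_sort item) item)
        (PySem.Dict.empty : PySem.Dict String (List (String × String)))).keys
      = PySem.Set.ofList (schema.map (pvLowKey key_to_sort)) := by
    rw [PySem.Dict.keys_foldl_insert_key schema (pvLowKey key_to_sort) (fun _ x => x) _,
      PySem.Dict.keys_empty, PySem.Set.update_nil_left]
  have hsortkeys : PySem.List.sorted (schema.foldl
        (fun d item => d.insert (pvLowKey key_to_sort item) item)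
        (PySem.Dict.empty : PySem.Dict String (List (String × String)))).keys (fun k => k)
      = PySem.List.dedup ((PySem.List.sorted schema (pvLowKey key_to_sort)).map
          (pvLowKey key_to_sort)) := by
    apply PySem.List.sorted_eq_of_perm_of_pairwise_lt
    · rw [hkeys]
      refine (List.perm_ext_iff_of_nodup (PySem.List.nodup_dedup _)
        (PySem.Set.nodup_ofList _)).mpr ?_
      intro a
      simp [PySem.Set.mem_ofList, List.mem_map, PySem.List.mem_sorted]
    · have hle : ((PySem.List.sorted schema (pvLowKey key_to_sort)).map
          (pvLowKey key_to_sort)).Pairwise (· ≤ ·) :=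
        List.pairwise_map.mpr (PySem.List.sorted_pairwise schema (pvLowKey key_to_sort))
      have hle' := List.Pairwise.sublist (dedup_sublist _) hle
      have hnd : (PySem.List.dedup ((PySem.List.sorted schema (pvLowKey key_to_sort)).map
          (pvLowKey key_to_sort))).Nodup := PySem.List.nodup_dedup _
      exact (List.Pairwise.and hle' hnd).imp (fun hp => lt_of_le_of_ne hp.1 hp.2)
  rw [hsortkeys]
  apply List.map_congr_left
  intro k _
  rw [PySem.Dict.getD_eq_get?_getD,
    get?_foldl_insert_key (pvLowKey key_to_sort) k schema PySem.Dict.empty,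
    PySem.Dict.get?_empty, Option.or_none,
    ← sorted_filter_stable (pvLowKey key_to_sort) k schema]

-- ===== VERDICT (by name: the statement is the Claim_ definition above) =====
theorem sort_list_by_dict_key_spec : Claim_equal_sort_list_by_dict_key := by
  intro schema key_to_sort _ _
  unfold Spec_sort_list_by_dict_key
  exact main_equiv schema key_to_sort
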